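-- pv_equiv track=rewrite | github.com/Dors-Coding-School/Coding | CodingDors Exercises/6_loops_solutions.py | sum_every_other_digit_two
-- ===== SOURCE A (Python) =====
-- def sum_every_other_digit_two(n: int) -> int:
-- 	sum = 0
-- 	n = n // 10
--
-- 	while n > 0:
-- 	  lastDigit = n % 10
-- 	  sum = sum + lastDigit
-- 	  n = n // 100
-- 	return sum
-- ===== SOURCE B (Python) =====
-- def sum_every_other_digit_two(n: int) -> int:
--     digits = []
--     while n > 0:
--         digits.append(n % 10)
--         n //= 10
--     return sum(d for i, d in enumerate(digits) if i % 2 == 1)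
-- ===== Notes on version B (the rewrite author's own statement) =====
-- stated objective: alternative
-- what changed: B collects the whole little-endian digit list with a single divide-by-ten loop and then sums the digits at odd indices, instead of A's running sum that drops the last digit first and then skips every other digit arithmetically with divide-by-a-hundred steps.
import Mathlib
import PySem

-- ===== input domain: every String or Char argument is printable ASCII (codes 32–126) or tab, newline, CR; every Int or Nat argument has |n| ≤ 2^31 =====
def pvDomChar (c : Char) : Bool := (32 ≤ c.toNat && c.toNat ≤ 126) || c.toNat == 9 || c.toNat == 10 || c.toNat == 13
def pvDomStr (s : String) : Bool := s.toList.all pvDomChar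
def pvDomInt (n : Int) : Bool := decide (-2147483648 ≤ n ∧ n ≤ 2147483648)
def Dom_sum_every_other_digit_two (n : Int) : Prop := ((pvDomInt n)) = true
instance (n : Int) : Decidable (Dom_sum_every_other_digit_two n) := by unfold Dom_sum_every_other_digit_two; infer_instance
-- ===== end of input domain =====

-- B collects the whole little-endian digit list with one divide-by-ten loop and sums the odd-index digits,
-- instead of A's running sum peeling digits with an initial tens division and hundreds-division steps (alternative, same cost).


-- termination helper for both digit loops
theorem pvToNat_floordiv_lt (m k : Int) (hk : 1 < k) (hm : 0 < m) :
    (PySem.Int.floordiv m k).toNat < m.toNat := by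
  rw [PySem.Int.floordiv_eq_ediv_of_pos (by omega)]
  have h1 : 0 ≤ m / k := Int.ediv_nonneg (by omega) (by omega)
  have h2 : m / k < m := by
    rw [Int.ediv_lt_iff_lt_mul (by omega)]
    nlinarith
  omega

-- ===== PORT A =====
-- while n > 0: sum += n % 10; n //= 100   (after an initial n //= 10)
def pvALoop (n sum : Int) : Int :=
  if 0 < n then pvALoop (PySem.Int.floordiv n 100) (sum + PySem.Int.mod n 10)
  else sum
termination_by n.toNat
decreasing_by exact pvToNat_floordiv_lt _ 100 (by omega) (by omega)

def sum_every_other_digit_two (n : Int) : Int :=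
  pvALoop (PySem.Int.floordiv n 10) 0

-- ===== PORT B =====
-- while n > 0: digits.append(n % 10); n //= 10
def pvBDigits (n : Int) (digits : List Int) : List Int :=
  if 0 < n then pvBDigits (PySem.Int.floordiv n 10) (digits ++ [PySem.Int.mod n 10])
  else digits
termination_by n.toNat
decreasing_by exact pvToNat_floordiv_lt _ 10 (by omega) (by omega)

-- sum(d for i, d in enumerate(digits) if i % 2 == 1)
def sum_every_other_digit_two_alt (n : Int) : Int :=
  (((PySem.List.enumerate (pvBDigits n []) 0).filter
      (fun p => PySem.Int.mod p.1 2 == 1)).map Prod.snd).sum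

-- ===== PRECONDITION & SPEC =====
def Spec_sum_every_other_digit_two (n : Int) (out : Int) : Prop := out = sum_every_other_digit_two_alt n
instance (n : Int) (out : Int) : Decidable (Spec_sum_every_other_digit_two n out) := by unfold Spec_sum_every_other_digit_two; infer_instance

-- ===== CLAIM (what is proved, stated in full; the proofs are below) =====
def Claim_equal_sum_every_other_digit_two : Prop := ∀ (n : Int), Dom_sum_every_other_digit_two n → Spec_sum_every_other_digit_two n (sum_every_other_digit_two n)

-- ===== LEMMAS AND PROOFS =====

-- proof-side digit list of n (little-endian), no accumulator
def pvD (n : Int) : List Int :=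
  if 0 < n then PySem.Int.mod n 10 :: pvD (PySem.Int.floordiv n 10)
  else []
termination_by n.toNat
decreasing_by exact pvToNat_floordiv_lt _ 10 (by omega) (by omega)

-- alternating sum: altSum true includes the head, altSum false skips it
def pvAltSum : Bool → List Int → Int
  | _, [] => 0
  | true, x :: xs => x + pvAltSum false xs
  | false, _ :: xs => pvAltSum true xs

theorem pvBDigits_eq (n : Int) : ∀ ds, pvBDigits n ds = ds ++ pvD n := by
  induction n using pvD.induct with
  | case1 n h ih =>
      intro ds
      rw [pvBDigits, pvD, if_pos h, if_pos h, ih]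
      simp
  | case2 n h =>
      intro ds
      rw [pvBDigits, pvD, if_neg h, if_neg h]
      simp

theorem pvD_nonpos {n : Int} (h : ¬ 0 < n) : pvD n = [] := by
  rw [pvD, if_neg h]

theorem pvFloordiv_nonpos {n : Int} (h : ¬ 0 < n) : ¬ 0 < PySem.Int.floordiv n 10 := by
  rw [PySem.Int.floordiv_eq_ediv_of_pos (by omega : (0:Int) < 10)]
  have : n / 10 < 1 := by rw [Int.ediv_lt_iff_lt_mul (by omega)]; omega
  omega

theorem pvD_step {n : Int} (h : 0 < n) :
    pvD n = PySem.Int.mod n 10 :: pvD (PySem.Int.floordiv n 10) := by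
  rw [pvD, if_pos h]

-- A's loop computes the head-included alternating sum of the digit list
theorem pvALoop_eq (n s : Int) : pvALoop n s = s + pvAltSum true (pvD n) := by
  induction n, s using pvALoop.induct with
  | case2 n s h =>
      rw [pvALoop, if_neg h, pvD_nonpos h, pvAltSum]
      omega
  | case1 n s h ih =>
      rw [pvALoop, if_pos h, ih, pvD_step h, pvAltSum]
      have h100 : PySem.Int.floordiv (PySem.Int.floordiv n 10) 10 = PySem.Int.floordiv n 100 := by
        rw [PySem.Int.floordiv_eq_ediv_of_pos (by omega : (0:Int) < 10),
            PySem.Int.floordiv_eq_ediv_of_pos (by omega : (0:Int) < 10),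
            PySem.Int.floordiv_eq_ediv_of_pos (by omega : (0:Int) < 100)]
        rw [Int.ediv_ediv_of_nonneg (by omega)]
        norm_num
      by_cases h10 : 0 < PySem.Int.floordiv n 10
      · rw [pvD_step h10, pvAltSum, h100]; omega
      · rw [pvD_nonpos h10, pvD_nonpos (h100 ▸ pvFloordiv_nonpos h10), pvAltSum, pvAltSum]
        omega

-- B's filtered enumerate-sum is the alternating sum (parity of the start index decides the head)
theorem pvEnumSum_eq (ds : List Int) : ∀ s : Int,
    (((PySem.List.enumerate ds s).filter (fun p => PySem.Int.mod p.1 2 == 1)).map Prod.snd).sum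
      = pvAltSum (PySem.Int.mod s 2 == 1) ds := by
  induction ds with
  | nil => intro s; simp [PySem.List.enumerate_nil, pvAltSum]
  | cons x xs ih =>
      intro s
      rw [PySem.List.enumerate_cons]
      have hmod : ∀ t : Int, PySem.Int.mod t 2 = t % 2 :=
        fun t => PySem.Int.mod_eq_emod_of_pos (by omega)
      have hflip : (PySem.Int.mod (s + 1) 2 == 1) = !(PySem.Int.mod s 2 == 1) := by
        rw [hmod, hmod]
        have h1 : (s + 1) % 2 = 1 - s % 2 := by omega
        rw [h1]
        rcases Int.emod_two_eq s with h | h <;> simp [h]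
      cases hb : (PySem.Int.mod s 2 == 1) with
      | true =>
          simp only [List.filter_cons, hb, if_true, List.map_cons, List.sum_cons, ih, hflip,
            Bool.not_true]
          rw [pvAltSum]
      | false =>
          simp only [List.filter_cons, hb, Bool.false_eq_true, if_false, ih, hflip,
            Bool.not_false]
          rw [pvAltSum]

theorem pvAlt_eq_loop (n : Int) :
    pvAltSum false (pvD n) = pvAltSum true (pvD (PySem.Int.floordiv n 10)) := by
  by_cases h : 0 < n
  · rw [pvD_step h, pvAltSum]
  · rw [pvD_nonpos h, pvD_nonpos (pvFloordiv_nonpos h), pvAltSum, pvAltSum]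

-- ===== VERDICT (by name: the statement is the Claim_ definition above) =====
theorem sum_every_other_digit_two_spec : Claim_equal_sum_every_other_digit_two := by
  intro n _
  unfold Spec_sum_every_other_digit_two sum_every_other_digit_two sum_every_other_digit_two_alt
  rw [pvBDigits_eq n [], List.nil_append, pvEnumSum_eq, pvALoop_eq]
  have h0 : (PySem.Int.mod (0:Int) 2 == 1) = false := by decide
  rw [h0, pvAlt_eq_loop]
  omega
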